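-- pv_equiv track=rewrite | github.com/pr4nshul/CFC-Python-DSA-March | Jyoti_Jauhari/Assignment4.py | consecutive_duplicate_modify
-- ===== SOURCE A (Python) =====
-- def consecutive_duplicate_modify(str,index=0,prev="",result=""):
--     if index == len(str):
--         return result
--
--     if prev == str[index]:
--         result += "-"
--     result += str[index]
--     prev = str[index]
--     return consecutive_duplicate_modify(str,index+1,prev,result)
-- ===== SOURCE B (Python) =====
-- def consecutive_duplicate_modify(str, index=0, prev="", result=""):
--     out = []
--     for i in range(index, len(str)):
--         c = str[i]
--         if prev == c:
--             out.append("-")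
--         out.append(c)
--         prev = c
--     return result + "".join(out)
-- ===== Notes on version B (the rewrite author's own statement) =====
-- stated objective: faster
-- what changed: Replaces the tail recursion threading prev/result through call frames by a single iterative loop that collects the output pieces in a list and joins them once at the end.
import Mathlib
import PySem

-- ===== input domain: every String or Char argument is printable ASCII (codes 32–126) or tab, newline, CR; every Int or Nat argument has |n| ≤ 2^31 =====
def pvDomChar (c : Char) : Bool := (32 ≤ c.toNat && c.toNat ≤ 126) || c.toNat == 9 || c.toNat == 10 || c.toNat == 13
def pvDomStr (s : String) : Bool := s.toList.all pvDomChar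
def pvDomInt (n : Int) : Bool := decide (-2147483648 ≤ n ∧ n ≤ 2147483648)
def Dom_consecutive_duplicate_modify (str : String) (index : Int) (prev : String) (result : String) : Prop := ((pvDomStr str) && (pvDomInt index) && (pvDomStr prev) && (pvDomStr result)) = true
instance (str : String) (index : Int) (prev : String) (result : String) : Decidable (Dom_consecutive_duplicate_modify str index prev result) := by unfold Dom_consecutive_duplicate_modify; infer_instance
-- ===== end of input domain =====

-- B replaces A's tail recursion by an iterative loop collecting output pieces in a list, joined once (idiomatic).

-- ===== PORT A =====
-- A's recursion, on the code-point lists of the strings (str[index] is the 1-char string [c]).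
def cdmA_go (s : List Char) (index : Int) (prev result : List Char) : List Char :=
  if index = (s.length : Int) then result
  else
    match h : PySem.List.pyGet? s index with
    | none => result  -- IndexError in Python; excluded by Pre_
    | some c =>
      let result1 := if prev = [c] then result ++ ['-'] else result
      let result2 := result1 ++ [c]
      cdmA_go s (index + 1) [c] result2
termination_by ((s.length : Int) - index).toNat
decreasing_by
  have hin : PySem.Raise.InRange s.length index := by
    by_contra hne
    rw [← PySem.List.pyGet?_eq_none_iff (xs := s) (i := index)] at hne
    simp [hne] at h
  rcases hin with ⟨_, hlt⟩
  omega

def consecutive_duplicate_modify (str : String) (index : Int) (prev : String) (result : String) : String :=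
  String.mk (cdmA_go str.toList index prev.toList result.toList)

-- ===== PORT B =====
-- B's loop body: one step of `for i in range(index, len(str))` with state (prev, out).
def cdmB_step (s : List Char) (st : List Char × List Char) (i : Int) : List Char × List Char :=
  match PySem.List.pyGet? s i with
  | none => st
  | some c => ([c], st.2 ++ (if st.1 = [c] then ['-', c] else [c]))

def consecutive_duplicate_modify_alt (str : String) (index : Int) (prev : String) (result : String) : String :=
  String.mk (result.toList ++
    ((PySem.List.pyRange index (str.toList.length : Int) 1).foldl (cdmB_step str.toList) (prev.toList, [])).2)

-- ===== PRECONDITION & SPEC =====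
-- Pre_ excludes exactly the inputs where A raises IndexError (index outside [-len, len]).
def Pre_consecutive_duplicate_modify (str : String) (index : Int) (prev : String) (result : String) : Prop :=
  -(str.toList.length : Int) ≤ index ∧ index ≤ (str.toList.length : Int)
instance (str : String) (index : Int) (prev : String) (result : String) : Decidable (Pre_consecutive_duplicate_modify str index prev result) := by unfold Pre_consecutive_duplicate_modify; infer_instance

def pvWitness_consecutive_duplicate_modify : String × Int × String × String := ("aabcc", 0, "", "")

def Spec_consecutive_duplicate_modify (str : String) (index : Int) (prev : String) (result : String) (out : String) : Prop := out = consecutive_duplicate_modify_alt str index prev result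
instance (str : String) (index : Int) (prev : String) (result : String) (out : String) : Decidable (Spec_consecutive_duplicate_modify str index prev result out) := by unfold Spec_consecutive_duplicate_modify; infer_instance

-- ===== CLAIM (what is proved, stated in full; the proofs are below) =====
def Claim_equal_consecutive_duplicate_modify : Prop := ∀ (str : String) (index : Int) (prev : String) (result : String), Dom_consecutive_duplicate_modify str index prev result → Pre_consecutive_duplicate_modify str index prev result → Spec_consecutive_duplicate_modify str index prev result (consecutive_duplicate_modify str index prev result)

-- ===== LEMMAS AND PROOFS =====

-- The accumulated output only grows on the right: foldl from (prev, a) is a ++ foldl from (prev, []).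
lemma cdmB_fold_shift (s : List Char) (l : List Int) :
    ∀ (prev a : List Char),
      (l.foldl (cdmB_step s) (prev, a)).2 = a ++ (l.foldl (cdmB_step s) (prev, [])).2 := by
  induction l with
  | nil => intro prev a; simp
  | cons i t ih =>
    intro prev a
    simp only [List.foldl_cons, cdmB_step]
    cases h : PySem.List.pyGet? s i with
    | none =>
      rw [ih prev a, ih prev []]
    | some c =>
      rw [ih [c] (a ++ (if prev = [c] then ['-', c] else [c])),
          ih [c] ([] ++ (if prev = [c] then ['-', c] else [c]))]
      simp

lemma cdm_main (s : List Char) :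
    ∀ (n : Nat) (index : Int) (prev result : List Char),
      ((s.length : Int) - index).toNat = n →
      -(s.length : Int) ≤ index → index ≤ (s.length : Int) →
      cdmA_go s index prev result =
        result ++ ((PySem.List.pyRange index (s.length : Int) 1).foldl (cdmB_step s) (prev, [])).2 := by
  intro n
  induction n with
  | zero =>
    intro index prev result hn _ hle
    have : index = (s.length : Int) := by omega
    subst this
    rw [cdmA_go, PySem.List.pyRange_one_eq_nil (by omega)]
    simp
  | succ n ih =>
    intro index prev result hn hlo hhi
    have hlt : index < (s.length : Int) := by omega
    have hin : PySem.Raise.InRange s.length index := ⟨hlo, hlt⟩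
    rw [cdmA_go, if_neg (by omega : ¬ index = (s.length : Int))]
    split
    · rename_i h
      rw [PySem.List.pyGet?_eq_none_iff] at h
      exact absurd hin h
    · rename_i c h
      rw [PySem.List.pyRange_one_cons hlt]
      simp only [List.foldl_cons, cdmB_step, h]
      rw [ih (index + 1) [c] _ (by omega) (by omega) (by omega)]
      rw [cdmB_fold_shift]
      by_cases hp : prev = [c]
      · simp only [hp, if_true, List.nil_append]
        rw [cdmB_fold_shift s _ [c] ['-', c]]
        simp
      · simp only [if_neg hp, List.nil_append]
        rw [cdmB_fold_shift s _ [c] [c]]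
        simp

-- ===== VERDICT (by name: the statement is the Claim_ definition above) =====
theorem consecutive_duplicate_modify_spec : Claim_equal_consecutive_duplicate_modify := by
  intro str index prev result _ hpre
  unfold Spec_consecutive_duplicate_modify consecutive_duplicate_modify consecutive_duplicate_modify_alt
  rw [cdm_main str.toList (((str.toList.length : Int) - index).toNat) index prev.toList result.toList rfl hpre.1 hpre.2]
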